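-- pv_equiv track=rewrite | github.com/Bautyruiz/repositorioprogramacion | ejercicios utn/ejs.listas.py | extremos_edad
-- ===== SOURCE A (Python) =====
-- def extremos_edad(lista_edad, lista_nombres):
--     edad_min = lista_edad[0]
--     edad_max = lista_edad[0]
--     nombre_joven = lista_nombres[0]
--     nombre_grande = lista_nombres[0]
--
--     # Encontrar la edad mínima y máxima manualmente
--     for i in range(1, len(lista_edad)):
--         if lista_edad[i] < edad_min:
--             edad_min = lista_edad[i]
--             nombre_joven = lista_nombres[i]
--         if lista_edad[i] > edad_max:
--             edad_max = lista_edad[i]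
--             nombre_grande = lista_nombres[i]
--
--     return nombre_joven, nombre_grande
-- ===== SOURCE B (Python) =====
-- def extremos_edad(lista_edad, lista_nombres):
--     joven = lista_nombres[lista_edad.index(min(lista_edad))]
--     grande = lista_nombres[lista_edad.index(max(lista_edad))]
--     return joven, grande
-- ===== Notes on version B (the rewrite author's own statement) =====
-- stated objective: simpler
-- what changed: Replaces the single fused index loop tracking four state variables with min()/max() to find each extreme age and list.index() to locate its first holder, matching A's first-occurrence tie-breaking.
-- outside the precondition, e.g. on extremos_edad([1, 2, 2], ['a', 'b']): A returns ('a', 'b'), B returns ('a', 'b'); on extremos_edad([], []): A raises IndexError, B raises ValueError; on extremos_edad([2, 1], ['a']): A raises IndexError, B raises IndexError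
import Mathlib
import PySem

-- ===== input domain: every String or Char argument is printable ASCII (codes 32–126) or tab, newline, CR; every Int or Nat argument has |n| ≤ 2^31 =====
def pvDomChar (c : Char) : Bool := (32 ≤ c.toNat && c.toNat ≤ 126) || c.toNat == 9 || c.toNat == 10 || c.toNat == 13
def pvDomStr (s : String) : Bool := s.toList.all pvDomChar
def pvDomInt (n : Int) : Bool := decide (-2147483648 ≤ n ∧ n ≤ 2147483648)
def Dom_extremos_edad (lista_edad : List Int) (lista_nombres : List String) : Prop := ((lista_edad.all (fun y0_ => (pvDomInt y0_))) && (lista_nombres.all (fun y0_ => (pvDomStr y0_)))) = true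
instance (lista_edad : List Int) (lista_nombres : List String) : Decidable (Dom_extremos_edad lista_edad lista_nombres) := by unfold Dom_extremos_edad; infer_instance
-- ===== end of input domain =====

-- B replaces A's fused four-variable scan by min()/max() to find each extreme age and
-- list.index() to locate its first holder (simpler decomposition; same first-occurrence ties).

-- ===== PORT A =====
def extremos_edad (lista_edad : List Int) (lista_nombres : List String) : String × String :=
  let edad_min := PySem.List.pyGetD lista_edad 0 0
  let edad_max := PySem.List.pyGetD lista_edad 0 0
  let nombre_joven := PySem.List.pyGetD lista_nombres 0 ""
  let nombre_grande := PySem.List.pyGetD lista_nombres 0 ""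
  let st := (PySem.List.pyRange 1 (PySem.List.len lista_edad)).foldl
    (fun (st : Int × Int × String × String) i =>
      let st1 := if PySem.List.pyGetD lista_edad i 0 < st.1 then
          (PySem.List.pyGetD lista_edad i 0, st.2.1, PySem.List.pyGetD lista_nombres i "", st.2.2.2)
        else st
      if PySem.List.pyGetD lista_edad i 0 > st1.2.1 then
          (st1.1, PySem.List.pyGetD lista_edad i 0, st1.2.2.1, PySem.List.pyGetD lista_nombres i "")
        else st1)
    (edad_min, edad_max, nombre_joven, nombre_grande)
  (st.2.2.1, st.2.2.2)

-- ===== PORT B =====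
def extremos_edad_alt (lista_edad : List Int) (lista_nombres : List String) : String × String :=
  let joven := PySem.List.pyGetD lista_nombres
    (((PySem.List.index? lista_edad (((PySem.List.min? lista_edad (fun y => y)).getD 0))).getD 0 : Nat) : Int) ""
  let grande := PySem.List.pyGetD lista_nombres
    (((PySem.List.index? lista_edad (((PySem.List.max? lista_edad (fun y => y)).getD 0))).getD 0 : Nat) : Int) ""
  (joven, grande)

-- ===== PRECONDITION & SPEC =====
-- Pre_ excludes the empty age list (A raises IndexError, B ValueError) and age lists longer than
-- the name list, on which A raises IndexError except when both extreme ages first occur at indices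
-- below len(lista_nombres) — an accidental shape no caller with parallel lists hits (B then agrees anyway).
def Pre_extremos_edad (lista_edad : List Int) (lista_nombres : List String) : Prop :=
  lista_edad ≠ [] ∧ lista_edad.length ≤ lista_nombres.length
instance (lista_edad : List Int) (lista_nombres : List String) : Decidable (Pre_extremos_edad lista_edad lista_nombres) := by unfold Pre_extremos_edad; infer_instance

def pvWitness_extremos_edad : List Int × List String := ([25, 30, 19], ["ana", "bea", "carla"])

def Spec_extremos_edad (lista_edad : List Int) (lista_nombres : List String) (out : String × String) : Prop := out = extremos_edad_alt lista_edad lista_nombres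
instance (lista_edad : List Int) (lista_nombres : List String) (out : String × String) : Decidable (Spec_extremos_edad lista_edad lista_nombres out) := by unfold Spec_extremos_edad; infer_instance

-- ===== CLAIM (what is proved, stated in full; the proofs are below) =====
def Claim_equal_extremos_edad : Prop := ∀ (lista_edad : List Int) (lista_nombres : List String), Dom_extremos_edad lista_edad lista_nombres → Pre_extremos_edad lista_edad lista_nombres → Spec_extremos_edad lista_edad lista_nombres (extremos_edad lista_edad lista_nombres)

-- ===== LEMMAS AND PROOFS =====

-- A's loop step, expressed on the pair (age, name) that index i selects.
def pvStep2 (st1 : Int × Int × String × String) (q : Int × String) : Int × Int × String × String :=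
  if q.1 > st1.2.1 then (st1.1, q.1, st1.2.2.1, q.2) else st1

def pvStepP (st : Int × Int × String × String) (q : Int × String) : Int × Int × String × String :=
  pvStep2 (if q.1 < st.1 then (q.1, st.2.1, q.2, st.2.2.2) else st) q

def pvMstep (p q : Int × String) : Int × String := if q.1 < p.1 then q else p
def pvXstep (p q : Int × String) : Int × String := if q.1 > p.1 then q else p

lemma pv_foldl_min_le (l : List Int) : ∀ a : Int, l.foldl min a ≤ a := by
  induction l with
  | nil => intro a; simp
  | cons b l ih => intro a; exact le_trans (ih (min a b)) (min_le_left a b)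

lemma pv_le_foldl_max (l : List Int) : ∀ a : Int, a ≤ l.foldl max a := by
  induction l with
  | nil => intro a; simp
  | cons b l ih => intro a; exact le_trans (le_max_left a b) (ih (max a b))

-- A's index loop over range(1, len) equals a fold over the zipped (age, name) pairs.
lemma pv_foldl_idx_pair {σ : Type} (f : σ → Int × String → σ) (le : List Int) (ln : List String)
    (h : le.length ≤ ln.length) :
    ∀ (n k : Nat), n = le.length - k → ∀ (s : σ),
    (PySem.List.pyRange (k : Int) (PySem.List.len le)).foldl
      (fun st i => f st (PySem.List.pyGetD le i 0, PySem.List.pyGetD ln i "")) s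
      = ((le.zip ln).drop k).foldl f s := by
  intro n
  induction n with
  | zero =>
    intro k hk s
    have hk' : le.length ≤ k := by omega
    rw [PySem.List.pyRange_one_eq_nil (by simp; exact_mod_cast hk'),
        List.drop_eq_nil_of_le (by simp [List.length_zip]; omega)]
    rfl
  | succ n ih =>
    intro k hk s
    have hk2 : k < le.length := by omega
    have hkn : k < ln.length := lt_of_lt_of_le hk2 h
    have hz : k < (le.zip ln).length := by simp [List.length_zip]; omega
    rw [PySem.List.pyRange_one_cons (by simp; exact_mod_cast hk2), List.foldl_cons,
        List.drop_eq_getElem_cons hz, List.foldl_cons]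
    have h1 : PySem.List.pyGetD le (k : Int) 0 = le[k] := by
      rw [PySem.List.pyGetD_natCast]; exact List.getD_eq_getElem le 0 hk2
    have h2 : PySem.List.pyGetD ln (k : Int) "" = ln[k] := by
      rw [PySem.List.pyGetD_natCast]; exact List.getD_eq_getElem ln "" hkn
    rw [h1, h2, show ((k : Int) + 1) = ((k + 1 : Nat) : Int) by push_cast; ring,
        List.getElem_zip]
    exact ih (k + 1) (by omega) _

-- A's fused step decouples into the min-scan and the max-scan.
lemma pv_decouple : ∀ (Z : List (Int × String)) (a b : Int) (x y : String),
    Z.foldl pvStepP (a, b, x, y) =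
      ((Z.foldl pvMstep (a, x)).1, (Z.foldl pvXstep (b, y)).1,
       (Z.foldl pvMstep (a, x)).2, (Z.foldl pvXstep (b, y)).2) := by
  intro Z
  induction Z with
  | nil => intro a b x y; rfl
  | cons q T ih =>
    intro a b x y
    have h : pvStepP (a, b, x, y) q =
        ((pvMstep (a, x) q).1, (pvXstep (b, y) q).1, (pvMstep (a, x) q).2, (pvXstep (b, y) q).2) := by
      by_cases h1 : q.1 < a <;> by_cases h2 : q.1 > b <;>
        simp [pvStepP, pvStep2, pvMstep, pvXstep, h1, h2]
    rw [List.foldl_cons, h, ih]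
    simp [List.foldl_cons]

-- The min-scan keeps the FIRST pair attaining the minimum age.
lemma pv_mscan_spec : ∀ (Z : List (Int × String)) (p : Int × String),
    ∃ pre suf, p :: Z = pre ++ (Z.foldl pvMstep p) :: suf ∧
      (Z.foldl pvMstep p).1 = (Z.map Prod.fst).foldl min p.1 ∧
      ∀ r ∈ pre, (Z.map Prod.fst).foldl min p.1 < r.1 := by
  intro Z
  induction Z with
  | nil => intro p; exact ⟨[], [], rfl, by simp, by simp⟩
  | cons q T ih =>
    intro p
    have hfold : ((q :: T).map Prod.fst).foldl min p.1 = (T.map Prod.fst).foldl min (min p.1 q.1) := by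
      simp
    by_cases hc : q.1 < p.1
    · obtain ⟨pre, suf, he, hv, hp⟩ := ih q
      have hm : ((q :: T).map Prod.fst).foldl min p.1 = (T.map Prod.fst).foldl min q.1 := by
        rw [hfold]; congr 1; omega
      refine ⟨p :: pre, suf, ?_, ?_, ?_⟩
      · have hstep : (q :: T).foldl pvMstep p = T.foldl pvMstep q := by
          simp [List.foldl_cons, pvMstep, hc]
        rw [hstep, List.cons_append, ← he]
      · have hstep : (q :: T).foldl pvMstep p = T.foldl pvMstep q := by
          simp [List.foldl_cons, pvMstep, hc]
        rw [hstep, hm]; exact hv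
      · intro r hr
        rw [hm]
        rcases List.mem_cons.1 hr with h1 | h1
        · subst h1
          have := pv_foldl_min_le (T.map Prod.fst) q.1
          omega
        · exact hm ▸ (hm.symm ▸ hp r h1)
    · obtain ⟨pre, suf, he, hv, hp⟩ := ih p
      have hm : ((q :: T).map Prod.fst).foldl min p.1 = (T.map Prod.fst).foldl min p.1 := by
        rw [hfold]; congr 1; omega
      have hstep : (q :: T).foldl pvMstep p = T.foldl pvMstep p := by
        simp [List.foldl_cons, pvMstep, hc]
      cases pre with
      | nil =>
        have hres : T.foldl pvMstep p = p := by
          have := he; simp at this; exact this.1.symm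
        refine ⟨[], q :: T, by simp [hstep, hres], by rw [hstep, hm]; exact hv, by simp⟩
      | cons p0 pre2 =>
        have he' : p = p0 ∧ T = pre2 ++ (T.foldl pvMstep p) :: suf := by
          have := he; simp at this; exact ⟨this.1, this.2⟩
        have hplt : (T.map Prod.fst).foldl min p.1 < p.1 := by
          have := hp p0 (by simp); rw [← he'.1] at this; exact this
        refine ⟨p :: q :: pre2, suf, ?_, ?_, ?_⟩
        · rw [hstep]
          simp only [List.cons_append]
          conv_lhs => rw [he'.2]
        · rw [hstep, hm]; exact hv
        · intro r hr
          rw [hm]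
          rcases List.mem_cons.1 hr with h1 | h1
          · subst h1; exact hplt
          rcases List.mem_cons.1 h1 with h2 | h2
          · subst h2; omega
          · exact hp r (by simp [h2])

-- The max-scan keeps the FIRST pair attaining the maximum age.
lemma pv_xscan_spec : ∀ (Z : List (Int × String)) (p : Int × String),
    ∃ pre suf, p :: Z = pre ++ (Z.foldl pvXstep p) :: suf ∧
      (Z.foldl pvXstep p).1 = (Z.map Prod.fst).foldl max p.1 ∧
      ∀ r ∈ pre, r.1 < (Z.map Prod.fst).foldl max p.1 := by
  intro Z
  induction Z with
  | nil => intro p; exact ⟨[], [], rfl, by simp, by simp⟩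
  | cons q T ih =>
    intro p
    have hfold : ((q :: T).map Prod.fst).foldl max p.1 = (T.map Prod.fst).foldl max (max p.1 q.1) := by
      simp
    by_cases hc : q.1 > p.1
    · obtain ⟨pre, suf, he, hv, hp⟩ := ih q
      have hm : ((q :: T).map Prod.fst).foldl max p.1 = (T.map Prod.fst).foldl max q.1 := by
        rw [hfold]; congr 1; omega
      refine ⟨p :: pre, suf, ?_, ?_, ?_⟩
      · have hstep : (q :: T).foldl pvXstep p = T.foldl pvXstep q := by
          simp [List.foldl_cons, pvXstep, hc]
        rw [hstep, List.cons_append, ← he]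
      · have hstep : (q :: T).foldl pvXstep p = T.foldl pvXstep q := by
          simp [List.foldl_cons, pvXstep, hc]
        rw [hstep, hm]; exact hv
      · intro r hr
        rw [hm]
        rcases List.mem_cons.1 hr with h1 | h1
        · subst h1
          have := pv_le_foldl_max (T.map Prod.fst) q.1
          omega
        · exact hp r h1
    · obtain ⟨pre, suf, he, hv, hp⟩ := ih p
      have hm : ((q :: T).map Prod.fst).foldl max p.1 = (T.map Prod.fst).foldl max p.1 := by
        rw [hfold]; congr 1; omega
      have hstep : (q :: T).foldl pvXstep p = T.foldl pvXstep p := by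
        simp [List.foldl_cons, pvXstep, hc]
      cases pre with
      | nil =>
        have hres : T.foldl pvXstep p = p := by
          have := he; simp at this; exact this.1.symm
        refine ⟨[], q :: T, by simp [hstep, hres], by rw [hstep, hm]; exact hv, by simp⟩
      | cons p0 pre2 =>
        have he' : p = p0 ∧ T = pre2 ++ (T.foldl pvXstep p) :: suf := by
          have := he; simp at this; exact ⟨this.1, this.2⟩
        have hplt : p.1 < (T.map Prod.fst).foldl max p.1 := by
          have := hp p0 (by simp); rw [← he'.1] at this; exact this
        refine ⟨p :: q :: pre2, suf, ?_, ?_, ?_⟩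
        · rw [hstep]
          simp only [List.cons_append]
          conv_lhs => rw [he'.2]
        · rw [hstep, hm]; exact hv
        · intro r hr
          rw [hm]
          rcases List.mem_cons.1 hr with h1 | h1
          · subst h1; exact hplt
          rcases List.mem_cons.1 h1 with h2 | h2
          · subst h2; omega
          · exact hp r (by simp [h2])

-- If L = pre ++ r :: suf with every fst in pre strictly off r.1, the first index of r.1
-- in the fst-projection is pre.length.
lemma pv_index_of_split (L : List (Int × String)) (pre suf : List (Int × String)) (r : Int × String)
    (he : L = pre ++ r :: suf) (hp : ∀ x ∈ pre, x.1 ≠ r.1) :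
    PySem.List.index? (L.map Prod.fst) r.1 = some pre.length := by
  rw [PySem.List.index?_eq_some_iff]
  refine ⟨pre.map Prod.fst, suf.map Prod.fst, ?_, by simp, ?_⟩
  · rw [he]; simp
  · intro hmem
    obtain ⟨x, hx, hx1⟩ := List.mem_map.1 hmem
    exact hp x hx hx1

-- Looking up the located first-extremal index in the name list returns the scanned pair's name.
lemma pv_name_lookup (h : Int) (t : List Int) (n0 : String) (ln' : List String)
    (hlen : t.length ≤ ln'.length)
    (res : Int × String) (pre suf : List (Int × String))
    (he : (h, n0) :: t.zip ln' = pre ++ res :: suf)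
    (hp : ∀ x ∈ pre, x.1 ≠ res.1) :
    PySem.List.pyGetD (n0 :: ln')
      (((PySem.List.index? (h :: t) res.1).getD 0 : Nat) : Int) "" = res.2 := by
  have hmap : ((h, n0) :: t.zip ln').map Prod.fst = h :: t := by
    simp [List.map_fst_zip hlen]
  have hidx := pv_index_of_split _ pre suf res he hp
  rw [hmap] at hidx
  rw [hidx, Option.getD_some]
  have hlc := congrArg List.length he
  simp [List.length_zip] at hlc
  have hlt : pre.length < ((h :: t).zip (n0 :: ln')).length := by
    simp [List.length_zip]; omega
  have hlt2 : pre.length < (n0 :: ln').length := by simp; omega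
  have hres : ((h :: t).zip (n0 :: ln'))[pre.length]'hlt = res := by
    rw [List.getElem_of_eq (by rw [List.zip_cons_cons, he]) hlt]
    rw [List.getElem_append_right (le_refl pre.length)]
    simp
  rw [PySem.List.pyGetD_natCast, List.getD_eq_getElem _ _ hlt2]
  have := congrArg Prod.snd hres
  rw [List.getElem_zip] at this
  exact this

-- ===== VERDICT (by name: the statement is the Claim_ definition above) =====
theorem extremos_edad_spec : Claim_equal_extremos_edad := by
  intro le ln _hdom hpre
  obtain ⟨hne, hlen⟩ := hpre
  obtain ⟨h, t, rfl⟩ := List.exists_cons_of_ne_nil hne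
  have hln : ln ≠ [] := by intro hnil; rw [hnil] at hlen; simp at hlen
  obtain ⟨n0, ln', rfl⟩ := List.exists_cons_of_ne_nil hln
  have hlen' : t.length ≤ ln'.length := by simp at hlen; omega
  -- evaluate port A into the pair-fold form (the loop body is definitionally pvStepP on the pair)
  show (((PySem.List.pyRange 1 (PySem.List.len (h :: t))).foldl
          (fun st i => pvStepP st (PySem.List.pyGetD (h :: t) i 0, PySem.List.pyGetD (n0 :: ln') i ""))
          (PySem.List.pyGetD (h :: t) 0 0, PySem.List.pyGetD (h :: t) 0 0,
           PySem.List.pyGetD (n0 :: ln') 0 "", PySem.List.pyGetD (n0 :: ln') 0 "")).2.2.1,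
        ((PySem.List.pyRange 1 (PySem.List.len (h :: t))).foldl
          (fun st i => pvStepP st (PySem.List.pyGetD (h :: t) i 0, PySem.List.pyGetD (n0 :: ln') i ""))
          (PySem.List.pyGetD (h :: t) 0 0, PySem.List.pyGetD (h :: t) 0 0,
           PySem.List.pyGetD (n0 :: ln') 0 "", PySem.List.pyGetD (n0 :: ln') 0 "")).2.2.2)
      = extremos_edad_alt (h :: t) (n0 :: ln')
  simp only [PySem.List.pyGetD_zero_cons]
  have hA := pv_foldl_idx_pair pvStepP (h :: t) (n0 :: ln') hlen t.length 1 (by simp) (h, h, n0, n0)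
  simp only [List.zip_cons_cons, List.drop_succ_cons, List.drop_zero, Nat.cast_one] at hA
  rw [hA, pv_decouple]
  -- evaluate port B
  have e2 : extremos_edad_alt (h :: t) (n0 :: ln') =
      (PySem.List.pyGetD (n0 :: ln')
        (((PySem.List.index? (h :: t) (t.foldl min h)).getD 0 : Nat) : Int) "",
       PySem.List.pyGetD (n0 :: ln')
        (((PySem.List.index? (h :: t) (t.foldl max h)).getD 0 : Nat) : Int) "") := by
    simp only [extremos_edad_alt, PySem.List.min?_id_cons, PySem.List.max?_id_cons, Option.getD_some]
  rw [e2]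
  have hmapfst : (t.zip ln').map Prod.fst = t := List.map_fst_zip hlen'
  obtain ⟨preM, sufM, heM, hvM, hpM⟩ := pv_mscan_spec (t.zip ln') (h, n0)
  obtain ⟨preX, sufX, heX, hvX, hpX⟩ := pv_xscan_spec (t.zip ln') (h, n0)
  rw [hmapfst] at hvM hpM hvX hpX
  have hBj := pv_name_lookup h t n0 ln' hlen' _ preM sufM heM
    (fun x hx => by have := hpM x hx; omega)
  have hBx := pv_name_lookup h t n0 ln' hlen' _ preX sufX heX
    (fun x hx => by have := hpX x hx; omega)
  rw [hvM] at hBj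
  rw [hvX] at hBx
  rw [hBj, hBx]
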